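-- pv_equiv track=rewrite | github.com/pypi-data/pypi-mirror-48 | packages/HandlerAPI/HandlerAPI-0.3.1.tar.gz/HandlerAPI-0.3.1/HandlerAPI/HandlerAPI.py | count_state
-- ===== SOURCE A (Python) =====
-- def count_state(api_data):
-- #     arr = [] #array
--     data = {} #dictionary{key:value}
--     count = 0
--     user_state = {}
--
--     for i in range (len(api_data)):
--         temp = api_data[i]['user']['login'] #temp untuk menyimpan nama developer
--         count+=1
--         if temp not in data: #jika temp tidak ada dalam dictionary, dia belum jadi key
--             data[temp] = set() #set temp sebagai key dalam dictionary
--         data[temp].add(count) #tambahkan value untuk key yang saat ini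
--
--     for user, value in data.items(): #dictionary di looping sebanyak panjang dictionary
--         user_state[user] = set() #set user sebagai key dalam dictionary user_state
--         user_state[user] = len(value) #tambahkan value dalam key user_state sepanjang nilai value
--
--     return user_state
-- ===== SOURCE B (Python) =====
-- def count_state(api_data):
--     # Single pass: keep an integer tally per login instead of building a set
--     # of distinct ids per user and measuring its size in a second loop.
--     counts = {}
--     for entry in api_data:
--         login = entry['user']['login']
--         counts[login] = counts.get(login, 0) + 1
--     return counts
-- ===== Notes on version B (the rewrite author's own statement) =====
-- stated objective: simpler
-- what changed: One pass that increments an integer counter per login, replacing A's per-user set of running ids plus a second loop that rebuilds a dict from the set sizes.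
import Mathlib
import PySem

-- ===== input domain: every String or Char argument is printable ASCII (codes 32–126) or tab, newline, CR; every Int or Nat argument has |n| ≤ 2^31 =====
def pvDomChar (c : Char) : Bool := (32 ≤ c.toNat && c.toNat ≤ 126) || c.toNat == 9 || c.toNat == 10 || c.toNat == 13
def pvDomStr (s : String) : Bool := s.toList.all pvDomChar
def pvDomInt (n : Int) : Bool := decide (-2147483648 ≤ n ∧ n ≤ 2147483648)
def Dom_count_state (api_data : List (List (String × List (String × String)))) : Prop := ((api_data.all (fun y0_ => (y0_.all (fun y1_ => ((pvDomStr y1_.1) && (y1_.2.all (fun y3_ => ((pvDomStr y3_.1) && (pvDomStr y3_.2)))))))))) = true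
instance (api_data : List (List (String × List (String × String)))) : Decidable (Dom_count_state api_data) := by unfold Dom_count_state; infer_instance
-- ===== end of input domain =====

-- B replaces A's per-user set of running ids (sized in a second loop) by a single pass
-- keeping an integer count per login; objective: simpler.

-- shared input accessor: d['user']['login'] as a first-match lookup; none = KeyError
def pvLogin (row : List (String × List (String × String))) : Option String :=
  ((PySem.Dict.mk row).get? "user").bind (fun u => (PySem.Dict.mk u).get? "login")

-- ===== PORT A =====
def count_state (api_data : List (List (String × List (String × String)))) : List (String × Int) :=
  -- for i in range(len(api_data)): build data : login -> set of running counts; count is the running total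
  let st := (PySem.List.pyRange 0 (PySem.List.len api_data)).foldl
    (fun (st : PySem.Dict String (PySem.Set Int) × Int) i =>
      -- temp = api_data[i]['user']['login']; KeyError (none) is excluded by Pre_, "" is never reached there
      let temp := (pvLogin (PySem.List.pyGetD api_data i [])).getD ""
      let count := st.2 + 1
      let data := if st.1.contains temp then st.1 else st.1.insert temp PySem.Set.empty
      (data.modify temp PySem.Set.empty (fun s => PySem.Set.add s count), count))
    (PySem.Dict.empty, (0 : Int))
  -- for user, value in data.items(): user_state[user] = len(value)
  -- (the 'user_state[user] = set()' line is dead: it is overwritten immediately)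
  let user_state := st.1.items.foldl
    (fun (us : PySem.Dict String Int) p => us.insert p.1 ((p.2.length : Int)))
    PySem.Dict.empty
  user_state.items

-- ===== PORT B =====
def count_state_alt (api_data : List (List (String × List (String × String)))) : List (String × Int) :=
  (api_data.foldl
    (fun (counts : PySem.Dict String Int) entry =>
      let login := (pvLogin entry).getD ""
      counts.insert login (counts.getD login 0 + 1))
    PySem.Dict.empty).items

-- ===== PRECONDITION & SPEC =====
-- Pre_ excludes exactly the rows on which Python A raises KeyError ('user' or 'login' missing)
def Pre_count_state (api_data : List (List (String × List (String × String)))) : Prop :=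
  ∀ row ∈ api_data, (pvLogin row).isSome = true
instance (api_data : List (List (String × List (String × String)))) : Decidable (Pre_count_state api_data) := by unfold Pre_count_state; infer_instance

def pvWitness_count_state : (List (List (String × List (String × String)))) :=
  [[("user", [("login", "alice")])], [("user", [("login", "bob")])], [("user", [("login", "alice")])]]

def Spec_count_state (api_data : List (List (String × List (String × String)))) (out : List (String × Int)) : Prop := out = count_state_alt api_data
instance (api_data : List (List (String × List (String × String)))) (out : List (String × Int)) : Decidable (Spec_count_state api_data out) := by unfold Spec_count_state; infer_instance

-- ===== CLAIM (what is proved, stated in full; the proofs are below) =====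
def Claim_equal_count_state : Prop := ∀ (api_data : List (List (String × List (String × String)))), Dom_count_state api_data → Pre_count_state api_data → Spec_count_state api_data (count_state api_data)

-- ===== LEMMAS AND PROOFS =====

-- A's loop body over the extracted login (defeq to the port's body)
def pvFa (st : PySem.Dict String (PySem.Set Int) × Int) (temp : String) :
    PySem.Dict String (PySem.Set Int) × Int :=
  let count := st.2 + 1
  let data := if st.1.contains temp then st.1 else st.1.insert temp PySem.Set.empty
  (data.modify temp PySem.Set.empty (fun s => PySem.Set.add s count), count)

lemma pvLength_add (s : PySem.Set Int) (c : Int) (hb : ∀ n ∈ s, n ≤ c) :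
    (PySem.Set.add s (c + 1)).length = s.length + 1 := by
  have hnm : (c + 1) ∉ s := fun h => absurd (hb _ h) (by omega)
  simp [PySem.Set.add, PySem.Set.contains, hnm]

lemma pvFoldA_spec (l : List String) (d : PySem.Dict String (PySem.Set Int)) (c : Int)
    (hnd : d.keys.Nodup) (hb : ∀ u, ∀ n ∈ d.getD u PySem.Set.empty, n ≤ c) :
    ((l.foldl pvFa (d, c)).1).keys = PySem.Set.update d.keys l ∧
    ((l.foldl pvFa (d, c)).1).keys.Nodup ∧
    ∀ u, (((l.foldl pvFa (d, c)).1).getD u PySem.Set.empty).length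
        = (d.getD u PySem.Set.empty).length + l.count u := by
  induction l generalizing d c with
  | nil => simp [hnd]
  | cons u l ih =>
    have hstep : pvFa (d, c) u =
        ((if d.contains u then d else d.insert u PySem.Set.empty).modify u PySem.Set.empty
          (fun s => PySem.Set.add s (c + 1)), c + 1) := rfl
    set D := if d.contains u then d else d.insert u PySem.Set.empty with hD
    have hDu : D.getD u PySem.Set.empty = d.getD u PySem.Set.empty := by
      by_cases hc : d.contains u
      · simp [hD, hc]
      · simp [hD, hc, PySem.Dict.getD_insert_self,
          PySem.Dict.getD_of_not_contains d _ (by simpa using hc)]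
    have hDv : ∀ v, v ≠ u → D.getD v PySem.Set.empty = d.getD v PySem.Set.empty := by
      intro v hv
      by_cases hc : d.contains u
      · simp [hD, hc]
      · simp [hD, hc, PySem.Dict.getD_insert_of_ne d _ _ hv]
    have hDkeys : D.keys = PySem.Set.add d.keys u := by
      by_cases hc : d.contains u
      · have : u ∈ d.keys := (PySem.Dict.contains_iff_mem_keys d u).mp hc
        simp [hD, hc, PySem.Set.add, PySem.Set.contains, this]
      · have hmem : u ∉ d.keys := fun h =>
          hc ((PySem.Dict.contains_iff_mem_keys d u).mpr h)
        simp [hD, hc, PySem.Dict.keys_insert_of_not_contains d _ (by simpa using hc),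
          PySem.Set.add, PySem.Set.contains, hmem]
    have hDnd : D.keys.Nodup := by
      by_cases hc : d.contains u
      · simp only [hD, if_pos hc]; exact hnd
      · simp only [hD, hc, Bool.false_eq_true, if_false]
        exact PySem.Dict.nodup_keys_insert d u _ hnd
    set d' := D.modify u PySem.Set.empty (fun s => PySem.Set.add s (c + 1)) with hd'
    have hd'getD : ∀ v, d'.getD v PySem.Set.empty =
        if v = u then PySem.Set.add (d.getD u PySem.Set.empty) (c + 1)
        else d.getD v PySem.Set.empty := by
      intro v
      rw [hd', PySem.Dict.getD_modify]
      split_ifs with hv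
      · exact congrArg (fun s => PySem.Set.add s (c + 1)) (hv ▸ hDu)
      · exact hDv v hv
    have hd'keys : d'.keys = PySem.Set.add d.keys u := by
      rw [hd', PySem.Dict.keys_modify, ← hDkeys]
      exact PySem.Dict.keys_insert_of_contains D _ (by
        by_cases hc : d.contains u
        · simp [hD, hc]
        · simp [hD, hc, PySem.Dict.contains_insert_self])
    have hd'nd : d'.keys.Nodup := by rw [hd'keys, ← hDkeys]; exact hDnd
    have hb' : ∀ v, ∀ n ∈ d'.getD v PySem.Set.empty, n ≤ c + 1 := by
      intro v n hn
      rw [hd'getD] at hn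
      by_cases hv : v = u
      · rw [if_pos hv] at hn
        rcases (PySem.Set.mem_add _ _ _).mp hn with h | h
        · exact le_trans (hb u n h) (by omega)
        · omega
      · rw [if_neg hv] at hn
        exact le_trans (hb v n hn) (by omega)
    obtain ⟨hk, hn2, hcnt⟩ := ih d' (c + 1) hd'nd hb'
    refine ⟨?_, ?_, ?_⟩
    · rw [List.foldl_cons, hstep, hk, hd'keys, PySem.Set.update_cons]
    · rw [List.foldl_cons, hstep]; exact hn2
    · intro v
      rw [List.foldl_cons, hstep, hcnt v, hd'getD v]
      by_cases hv : v = u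
      · rw [if_pos hv, pvLength_add _ _ (hb u), hv, List.count_cons_self]
        omega
      · rw [if_neg hv]
        have : (u :: l).count v = l.count v := by
          simp [Ne.symm hv]
        omega

-- ===== VERDICT (by name: the statement is the Claim_ definition above) =====
theorem count_state_spec : Claim_equal_count_state := by
  unfold Claim_equal_count_state
  intro api_data _hdom _hpre
  show count_state api_data = count_state_alt api_data
  set keyf : List (String × List (String × String)) → String :=
    fun row => (pvLogin row).getD "" with hkeyf
  set logins := api_data.map keyf with hlog
  -- A's first loop is a fold of pvFa over the extracted logins
  have hA1 : count_state api_data =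
      ((logins.foldl pvFa (PySem.Dict.empty, (0 : Int))).1.items.foldl
        (fun (us : PySem.Dict String Int) p => us.insert p.1 ((p.2.length : Int)))
        PySem.Dict.empty).items := by
    simp only [count_state]
    rw [show (PySem.List.pyRange 0 (PySem.List.len api_data)).foldl
        (fun (st : PySem.Dict String (PySem.Set Int) × Int) i =>
          let temp := (pvLogin (PySem.List.pyGetD api_data i [])).getD ""
          let count := st.2 + 1
          let data := if st.1.contains temp then st.1 else st.1.insert temp PySem.Set.empty
          (data.modify temp PySem.Set.empty (fun s => PySem.Set.add s count), count))
        (PySem.Dict.empty, (0 : Int)) =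
        (PySem.List.pyRange 0 (PySem.List.len api_data)).foldl
        (fun acc j => (fun st row => pvFa st (keyf row)) acc (PySem.List.pyGetD api_data j []))
        (PySem.Dict.empty, (0 : Int)) from rfl]
    rw [PySem.List.foldl_pyRange_pyGetD api_data []
      (fun st row => pvFa st (keyf row)) (PySem.Dict.empty, (0 : Int)) (le_refl 0)]
    rw [hlog, List.foldl_map]
    rfl
  set r := (logins.foldl pvFa (PySem.Dict.empty, (0 : Int))).1 with hr
  obtain ⟨hk, hnd, hcnt⟩ := pvFoldA_spec logins PySem.Dict.empty 0
    PySem.Dict.nodup_keys_empty (by simp [PySem.Dict.getD_empty, PySem.Set.empty])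
  have hkeys : r.keys = PySem.Set.ofList logins := by
    rw [← hr] at hk; rw [hk, PySem.Dict.keys_empty, PySem.Set.update_nil_left]
  rw [← hr] at hnd hcnt
  -- A's second loop appends the (user, size) pairs over distinct keys
  have hA2 : (r.items.foldl
      (fun (us : PySem.Dict String Int) p => us.insert p.1 ((p.2.length : Int)))
      PySem.Dict.empty).items =
      r.items.map (fun p => (p.1, (p.2.length : Int))) := by
    rw [PySem.Dict.items_foldl_insert_fresh r.items Prod.fst
      (fun p => ((p.2.length : Int))) PySem.Dict.empty
      (by intro a _; exact PySem.Dict.contains_empty _)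
      (by simpa [PySem.Dict.keys] using hnd)]
    simp [PySem.Dict.empty]
  have hA3 : r.items.map (fun p => (p.1, (p.2.length : Int))) =
      (PySem.Set.ofList logins).map (fun k => (k, (logins.count k : Int))) := by
    rw [PySem.Dict.items_eq_map_keys r hnd PySem.Set.empty, List.map_map, hkeys]
    refine List.map_congr_left ?_
    intro k _
    simp only [Function.comp]
    simpa [PySem.Set.empty, PySem.Dict.getD_empty] using hcnt k
  -- B's loop is Counter(logins)
  have hB : count_state_alt api_data =
      (PySem.Set.ofList logins).map (fun k => (k, (logins.count k : Int))) := by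
    simp only [count_state_alt]
    rw [show api_data.foldl
        (fun (counts : PySem.Dict String Int) entry =>
          let login := (pvLogin entry).getD ""
          counts.insert login (counts.getD login 0 + 1))
        PySem.Dict.empty =
        (api_data.map keyf).foldl
          (fun (d : PySem.Dict String Int) x => d.insert x (d.getD x 0 + 1))
          PySem.Dict.empty from
      (List.foldl_map (f := keyf)
        (g := fun (d : PySem.Dict String Int) x => d.insert x (d.getD x 0 + 1))
        (l := api_data) (init := PySem.Dict.empty)).symm]
    rw [← hlog, PySem.Dict.foldl_insert_getD_add_one_eq_counter,
      PySem.Dict.items_counter]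
  rw [hA1, hA2, hA3, hB]
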